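-- pv_equiv track=rewrite | github.com/RohitDen007/devops-portfolio | discover-projects.py | _extract_description
-- ===== SOURCE A (Python) =====
-- def _extract_description(readme_content: str) -> str:
--     """Extract project description from README"""
--     # Get content between title and next heading
--     lines = readme_content.split('\n')
--     description_lines = []
--     found_title = False
--
--     for line in lines:
--         if line.startswith('#'):
--             if found_title:
--                 break
--             found_title = True
--             continue
--
--         if found_title and line.strip() and not line.startswith('#'):
--             description_lines.append(line.strip())
--
--         if found_title and len(description_lines) >= 2:
--             break
--
--     description = ' '.join(description_lines).strip()
--     return description[:200] if description else 'A great project'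
-- ===== SOURCE B (Python) =====
-- def _extract_description(readme_content: str) -> str:
--     """Extract project description from README (region-based: locate heading boundaries, then transform the slice)."""
--     lines = readme_content.split('\n')
--     start = next((i for i, l in enumerate(lines) if l.startswith('#')), None)
--     if start is None:
--         return 'A great project'
--     body = lines[start + 1:]
--     end = next((i for i, l in enumerate(body) if l.startswith('#')), len(body))
--     picked = [l.strip() for l in body[:end] if l.strip()][:2]
--     description = ' '.join(picked)
--     return description[:200] if description else 'A great project'
-- ===== Notes on version B (the rewrite author's own statement) =====
-- stated objective: alternative
-- what changed: A's single stateful scan (found_title flag, accumulator, two break conditions) is replaced by a region-based decomposition: find the first heading line, find the next heading after it, then slice the region between them, strip/drop blanks, keep the first two lines and join.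
import Mathlib
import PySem

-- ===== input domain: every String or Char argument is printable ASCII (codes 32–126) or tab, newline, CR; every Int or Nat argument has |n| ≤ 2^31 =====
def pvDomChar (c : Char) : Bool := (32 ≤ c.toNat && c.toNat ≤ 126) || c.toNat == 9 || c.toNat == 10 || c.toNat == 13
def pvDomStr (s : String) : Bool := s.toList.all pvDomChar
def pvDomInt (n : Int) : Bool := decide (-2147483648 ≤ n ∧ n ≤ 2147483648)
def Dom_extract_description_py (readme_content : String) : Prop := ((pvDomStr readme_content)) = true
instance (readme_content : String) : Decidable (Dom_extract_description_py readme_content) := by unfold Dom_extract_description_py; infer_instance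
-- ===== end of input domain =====

-- B replaces A's single stateful scanning loop by a find-the-heading-region-then-transform-it
-- decomposition (objective: alternative/simpler structure, same asymptotic cost).

-- ===== PORT A =====
-- shared one-liners: "line.startswith('#')" and "bool(line.strip())"
def pvHash (l : List Char) : Bool := PySem.Chars.startswith l ['#']
def pvNB (l : List Char) : Bool := !(PySem.Chars.strip l).isEmpty

-- the for-loop of A, with its two `break`s, as structural recursion over the lines
def pvLoopA : List (List Char) → Bool → List (List Char) → List (List Char)
  | [], _, acc => acc
  | line :: rest, found_title, acc =>
    if pvHash line then
      if found_title then acc else pvLoopA rest true acc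
    else
      let acc' := if found_title && pvNB line && !pvHash line then acc ++ [PySem.Chars.strip line] else acc
      if found_title && decide (2 ≤ acc'.length) then acc' else pvLoopA rest found_title acc'

def extract_description_py (readme_content : String) : String :=
  let lines := PySem.Chars.splitOn readme_content.toList ['\n']
  let description_lines := pvLoopA lines false []
  let description := PySem.Chars.strip (PySem.Chars.join [' '] description_lines)
  if description.isEmpty then "A great project"
  else String.ofList (PySem.Chars.slice description none (some 200))

-- ===== PORT B =====
def extract_description_py_alt (readme_content : String) : String :=
  let lines := PySem.Chars.splitOn readme_content.toList ['\n']
  match lines.findIdx? pvHash with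
  | none => "A great project"
  | some start =>
    let body := lines.drop (start + 1)
    let endIdx := (body.findIdx? pvHash).getD body.length
    let picked := (((body.take endIdx).filter pvNB).map PySem.Chars.strip).take 2
    let description := PySem.Chars.join [' '] picked
    if description.isEmpty then "A great project"
    else String.ofList (PySem.Chars.slice description none (some 200))

-- ===== PRECONDITION & SPEC =====
def Spec_extract_description_py (readme_content : String) (out : String) : Prop := out = extract_description_py_alt readme_content
instance (readme_content : String) (out : String) : Decidable (Spec_extract_description_py readme_content out) := by unfold Spec_extract_description_py; infer_instance

-- ===== CLAIM (what is proved, stated in full; the proofs are below) =====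
def Claim_equal_extract_description_py : Prop := ∀ (readme_content : String), Dom_extract_description_py readme_content → Spec_extract_description_py readme_content (extract_description_py readme_content)

-- ===== LEMMAS AND PROOFS =====

-- a nonempty dropWhile result starts with an element failing the predicate
lemma pvDropWhile_head {α : Type} (p : α → Bool) (l : List α) (h : α) (t : List α)
    (hx : List.dropWhile p l = h :: t) : p h = false := by
  induction l with
  | nil => simp at hx
  | cons a l ih =>
    by_cases hpa : p a = true
    · rw [List.dropWhile_cons_of_pos hpa] at hx; exact ih hx
    · rw [List.dropWhile_cons_of_neg hpa] at hx
      cases hx; simpa using hpa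

lemma pvDropWhile_idem {α : Type} (p : α → Bool) (l : List α) :
    List.dropWhile p (List.dropWhile p l) = List.dropWhile p l := by
  cases hx : List.dropWhile p l with
  | nil => rfl
  | cons h t => rw [List.dropWhile_cons_of_neg (by simp [pvDropWhile_head p l h t hx])]

lemma pvLstrip_rstrip_of_strip (x : List Char) (h : PySem.Chars.strip x = x) :
    PySem.Chars.lstrip x = x ∧ PySem.Chars.rstrip x = x := by
  have hsuf : PySem.Chars.lstrip x <:+ x := List.dropWhile_suffix _
  have h1 : (PySem.Chars.lstrip x).length ≤ x.length := List.length_dropWhile_le _ _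
  have h2 : x.length ≤ (PySem.Chars.lstrip x).length := by
    conv_lhs => rw [← h]
    simpa [PySem.Chars.strip, PySem.Chars.rstrip] using
      List.length_dropWhile_le PySem.Chars.isspace (PySem.Chars.lstrip x).reverse
  have hl : PySem.Chars.lstrip x = x := hsuf.eq_of_length (le_antisymm h1 h2)
  refine ⟨hl, ?_⟩
  have := h; rw [PySem.Chars.strip, hl] at this; exact this

lemma pvStrip_idem (s : List Char) : PySem.Chars.strip (PySem.Chars.strip s) = PySem.Chars.strip s := by
  cases hx : PySem.Chars.strip s with
  | nil => rfl
  | cons h t =>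
    have hu : PySem.Chars.rstrip (PySem.Chars.lstrip s) = h :: t := hx
    have hpre : PySem.Chars.rstrip (PySem.Chars.lstrip s) <+: PySem.Chars.lstrip s := by
      rw [PySem.Chars.rstrip]
      have hs := List.dropWhile_suffix (l := (PySem.Chars.lstrip s).reverse) PySem.Chars.isspace
      simpa using List.reverse_prefix.mpr hs
    rw [hu] at hpre
    obtain ⟨r, hr⟩ := hpre
    have hls' : PySem.Chars.lstrip s = h :: (t ++ r) := by rw [← hr]; simp
    rw [PySem.Chars.lstrip] at hls'
    have hhead : PySem.Chars.isspace h = false := pvDropWhile_head _ s h (t ++ r) hls'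
    have hls : PySem.Chars.lstrip (h :: t) = h :: t := by
      rw [PySem.Chars.lstrip, List.dropWhile_cons_of_neg (by simp [hhead])]
    have hrs : PySem.Chars.rstrip (h :: t) = h :: t := by
      rw [← hu, PySem.Chars.rstrip, PySem.Chars.rstrip, List.reverse_reverse, pvDropWhile_idem]
    rw [PySem.Chars.strip, hls, hrs]

lemma pvStrip_append2 (a b : List Char) (ha : PySem.Chars.strip a = a) (ha0 : a ≠ [])
    (hb : PySem.Chars.strip b = b) (hb0 : b ≠ []) :
    PySem.Chars.strip (a ++ ' ' :: b) = a ++ ' ' :: b := by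
  obtain ⟨hla, -⟩ := pvLstrip_rstrip_of_strip a ha
  obtain ⟨-, hrb⟩ := pvLstrip_rstrip_of_strip b hb
  have hdb : List.dropWhile PySem.Chars.isspace b.reverse = b.reverse := by
    have := hrb; rw [PySem.Chars.rstrip] at this
    have := congrArg List.reverse this; simpa using this
  have hda : List.dropWhile PySem.Chars.isspace a = a := hla
  rw [PySem.Chars.strip, PySem.Chars.lstrip, List.dropWhile_append, hda]
  rw [if_neg (by simpa using ha0)]
  rw [PySem.Chars.rstrip]
  have : (a ++ ' ' :: b).reverse = b.reverse ++ (' ' :: a.reverse) := by simp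
  rw [this, List.dropWhile_append, hdb, if_neg (by simpa using hb0)]
  simp

-- lines[:first index of p] = takeWhile (not p)
lemma pvTakeFindIdx {α : Type} (p : α → Bool) (l : List α) :
    l.take ((l.findIdx? p).getD l.length) = l.takeWhile (fun x => !p x) := by
  induction l with
  | nil => rfl
  | cons x xs ih =>
    rw [List.findIdx?_cons]
    by_cases hx : p x = true
    · simp [hx]
    · cases hfi : xs.findIdx? p with
      | none => simp [hx, hfi] at ih ⊢; exact ih
      | some i => simp [hx, hfi] at ih ⊢; exact ih

-- A's loop after the title was found collects the first two stripped nonblank lines before the next heading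
lemma pvLoopA_true (rest : List (List Char)) : ∀ acc : List (List Char), acc.length < 2 →
    pvLoopA rest true acc =
      (acc ++ ((rest.takeWhile (fun l => !pvHash l)).filter pvNB).map PySem.Chars.strip).take 2 := by
  induction rest with
  | nil => intro acc hacc; simpa [pvLoopA] using (List.take_of_length_le (by omega)).symm
  | cons l rest ih =>
    intro acc hacc
    by_cases hh : pvHash l = true
    · rw [pvLoopA]
      simp [hh, List.take_of_length_le (le_of_lt hacc)]
    · by_cases hq : pvNB l = true
      · match acc, hacc with
        | [], _ =>
          have hstep : pvLoopA (l :: rest) true [] = pvLoopA rest true [PySem.Chars.strip l] := by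
            rw [pvLoopA]; simp [hh, hq]
          rw [hstep, ih [PySem.Chars.strip l] (by simp)]
          simp [hh, hq]
        | [a], _ =>
          rw [pvLoopA]
          simp [hh, hq]
      · have h2 : ¬ (2 ≤ acc.length) := by omega
        have hstep : pvLoopA (l :: rest) true acc = pvLoopA rest true acc := by
          rw [pvLoopA]; simp [hh, hq, h2]
        rw [hstep, ih acc hacc]
        simp [hh, hq]

-- characterization of A's whole loop from the initial state
lemma pvLoopA_false (lines : List (List Char)) :
    pvLoopA lines false [] =
      match lines.findIdx? pvHash with
      | none => []
      | some start =>
        (((lines.drop (start + 1)).take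
            (((lines.drop (start + 1)).findIdx? pvHash).getD (lines.drop (start + 1)).length)).filter
          pvNB).map PySem.Chars.strip |>.take 2 := by
  induction lines with
  | nil => rfl
  | cons l rest ih =>
    rw [List.findIdx?_cons]
    by_cases hh : pvHash l = true
    · rw [pvLoopA, if_pos hh, if_neg (by simp)]
      simp only [hh, if_true]
      rw [pvLoopA_true rest [] (by simp), pvTakeFindIdx]
      simp
    · have hstep : pvLoopA (l :: rest) false [] = pvLoopA rest false [] := by
        rw [pvLoopA]; simp [hh]
      rw [hstep, ih]
      cases hfi : rest.findIdx? pvHash with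
      | none => simp [hh]
      | some i => simp [hh]

lemma pvPicked_mem (body : List (List Char)) (n : Nat) (x : List Char)
    (hx : x ∈ (((body.take n).filter pvNB).map PySem.Chars.strip).take 2) :
    PySem.Chars.strip x = x ∧ x ≠ [] := by
  have hx' := List.mem_of_mem_take hx
  obtain ⟨l, hl, rfl⟩ := List.mem_map.mp hx'
  have hq : pvNB l = true := List.of_mem_filter hl
  constructor
  · exact pvStrip_idem l
  · intro h0; rw [pvNB, h0] at hq; simp at hq

lemma pvWrapEq (picked : List (List Char))
    (hmem : ∀ x ∈ picked, PySem.Chars.strip x = x ∧ x ≠ []) (hlen : picked.length ≤ 2) :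
    (if (PySem.Chars.strip (PySem.Chars.join [' '] picked)).isEmpty then "A great project"
     else String.ofList (PySem.Chars.slice (PySem.Chars.strip (PySem.Chars.join [' '] picked)) none (some 200)))
    = (if (PySem.Chars.join [' '] picked).isEmpty then "A great project"
       else String.ofList (PySem.Chars.slice (PySem.Chars.join [' '] picked) none (some 200))) := by
  rcases picked with _ | ⟨a, _ | ⟨b, rest⟩⟩
  · rfl
  · obtain ⟨hsa, ha0⟩ := hmem a (by simp)
    rw [PySem.Chars.join_singleton, hsa]
  · have : rest = [] := by simpa using hlen
    subst this
    obtain ⟨hsa, ha0⟩ := hmem a (by simp)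
    obtain ⟨hsb, hb0⟩ := hmem b (by simp)
    rw [PySem.Chars.join_cons_cons, PySem.Chars.join_singleton]
    have hab : a ++ [' '] ++ b = a ++ ' ' :: b := by simp
    rw [hab, pvStrip_append2 a b hsa ha0 hsb hb0]

-- ===== VERDICT (by name: the statement is the Claim_ definition above) =====
theorem extract_description_py_spec : Claim_equal_extract_description_py := by
  intro readme_content _
  unfold Spec_extract_description_py extract_description_py extract_description_py_alt
  simp only [pvLoopA_false]
  cases hfi : (PySem.Chars.splitOn readme_content.toList ['\n']).findIdx? pvHash with
  | none => rfl
  | some start =>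
    exact pvWrapEq _ (fun x hx => pvPicked_mem _ _ x hx) (List.length_take_le _ _)
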